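-- pv_equiv track=rewrite | github.com/ejaj/open-vision | msoft.py | solution
-- ===== SOURCE A (Python) =====
-- def solution(S):
--     minimum_swaps = float('inf')
--     for i in range(len(S) + 1):
--         red_right = S[i:].count('R')
--         white_left = S[:i].count('W')
--         swaps = red_right + white_left
--         minimum_swaps = min(minimum_swaps, swaps)
--     return minimum_swaps if minimum_swaps <= 10 ** 9 else -1
-- ===== SOURCE B (Python) =====
-- def solution(S):
--     # One pass: cur tracks (R's right of split) + (W's left of split) as the split moves right.
--     best = cur = S.count('R')
--     for ch in S:
--         if ch == 'R':
--             cur -= 1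
--         elif ch == 'W':
--             cur += 1
--         if cur < best:
--             best = cur
--     return best if best <= 10 ** 9 else -1
-- ===== Notes on version B (the rewrite author's own statement) =====
-- stated objective: faster
-- what changed: Instead of recounting R's in the suffix and W's in the prefix for every split point, B counts R once and sweeps the string once with a running swap count and running minimum.
import Mathlib
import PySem

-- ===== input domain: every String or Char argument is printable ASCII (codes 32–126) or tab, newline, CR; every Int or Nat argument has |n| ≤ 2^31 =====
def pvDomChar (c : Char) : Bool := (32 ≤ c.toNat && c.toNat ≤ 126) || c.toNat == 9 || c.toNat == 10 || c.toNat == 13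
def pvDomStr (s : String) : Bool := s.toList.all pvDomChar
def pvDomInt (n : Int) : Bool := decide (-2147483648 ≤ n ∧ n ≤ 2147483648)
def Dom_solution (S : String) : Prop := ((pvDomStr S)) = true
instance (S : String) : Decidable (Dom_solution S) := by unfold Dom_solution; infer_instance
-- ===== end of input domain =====

-- B replaces A's rescan of both sides of every split point by one left-to-right pass
-- maintaining the running swap count (objective: faster).

-- ===== PORT A =====
-- `minimum_swaps = float('inf')` is modelled as `none`; `min(inf, x) = x` is the `none` branch,
-- and the unreachable `none` at the end is Python's `inf ≤ 10**9 = False` branch, i.e. -1.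
def solution (S : String) : Int :=
  let minimum_swaps : Option Int :=
    (PySem.List.pyRange 0 (PySem.Str.len S + 1)).foldl
      (fun (minimum_swaps : Option Int) (i : Int) =>
        let red_right : Int := (PySem.Str.count (PySem.Str.slice S (some i) none) "R" : Int)
        let white_left : Int := (PySem.Str.count (PySem.Str.slice S none (some i)) "W" : Int)
        let swaps : Int := red_right + white_left
        some (match minimum_swaps with
              | none => swaps
              | some m => min m swaps)) none
  match minimum_swaps with
  | some m => if m ≤ 10 ^ 9 then m else -1
  | none => -1

-- ===== PORT B =====
def solution_alt (S : String) : Int :=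
  let total : Int := (PySem.Str.count S "R" : Int)
  let bc : Int × Int := S.toList.foldl
    (fun (p : Int × Int) ch =>
      let cur : Int := if ch = 'R' then p.2 - 1 else if ch = 'W' then p.2 + 1 else p.2
      (if cur < p.1 then cur else p.1, cur)) (total, total)
  if bc.1 ≤ 10 ^ 9 then bc.1 else -1

-- ===== PRECONDITION & SPEC =====
def Spec_solution (S : String) (out : Int) : Prop := out = solution_alt S
instance (S : String) (out : Int) : Decidable (Spec_solution S out) := by unfold Spec_solution; infer_instance

-- ===== CLAIM (what is proved, stated in full; the proofs are below) =====
def Claim_equal_solution : Prop := ∀ (S : String), Dom_solution S → Spec_solution S (solution S)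

-- ===== LEMMAS AND PROOFS =====

-- `str.count` with a single-character needle is `List.count` of that character.
theorem count_go_one (c : Char) : ∀ (fuel : Nat) (l : List Char) (acc : Nat),
    l.length ≤ fuel → PySem.Chars.count.go [c] fuel l acc = acc + l.count c := by
  intro fuel
  induction fuel with
  | zero => intro l acc h; cases l with
    | nil => simp [PySem.Chars.count.go]
    | cons a t => simp at h
  | succ n ih =>
    intro l acc h
    cases l with
    | nil => simp [PySem.Chars.count.go]
    | cons a t =>
      simp only [PySem.Chars.count.go]
      by_cases hc : c = a
      · subst hc
        simp [List.isPrefixOf, ih t (acc + 1) (by simpa using h)]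
        omega
      · simp [List.isPrefixOf, hc, ih t acc (by simpa using h), List.count_cons]
        exact fun h' => absurd h'.symm hc

theorem count_one (l : List Char) (c : Char) : PySem.Chars.count l [c] = l.count c := by
  simp [PySem.Chars.count, count_go_one c l.length l 0 le_rfl]

-- swaps needed at split point j: R's in the suffix + W's in the prefix
def fval (L : List Char) (j : Nat) : Int :=
  ((L.drop j).count 'R' : Int) + ((L.take j).count 'W' : Int)

-- the same value written from the prefix only (suffix R's = total R's - prefix R's)
theorem fval_eq (L : List Char) (k : Nat) :
    fval L k = (L.count 'R' : Int) + (((L.take k).count 'W' : Int) - ((L.take k).count 'R' : Int)) := by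
  have h := congrArg (List.count 'R') (List.take_append_drop k L)
  rw [List.count_append] at h
  simp only [fval]
  omega

-- A's loop body at index j is fval
theorem step_val (S : String) (j : Nat) :
    ((PySem.Str.count (PySem.Str.slice S (some (j : Int)) none) "R" : Int)
      + (PySem.Str.count (PySem.Str.slice S none (some (j : Int))) "W" : Int))
    = fval S.toList j := by
  have h1 : (PySem.Str.slice S (some (j : Int)) none).toList = S.toList.drop j := by
    rw [PySem.Str.toList_slice]; exact PySem.List.slice_from_natCast _ _
  have h2 : (PySem.Str.slice S none (some (j : Int))).toList = S.toList.take j := by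
    rw [PySem.Str.toList_slice]; exact PySem.List.slice_to_natCast _ _
  simp [PySem.Str.count_eq, fval, h1, h2,
    show ("R".toList = ['R']) from rfl, show ("W".toList = ['W']) from rfl, count_one]

-- A's Option-valued fold, once seeded with `some a`, is a plain running minimum
theorem foldl_opt_min (g : Nat → Int) : ∀ (js : List Nat) (a : Int),
    js.foldl (fun (acc : Option Int) j =>
        some (match acc with | none => g j | some m => min m (g j))) (some a)
      = some (js.foldl (fun m j => min m (g j)) a) := by
  intro js
  induction js with
  | nil => intro a; rfl
  | cons j t ih => intro a; simpa using ih (min a (g j))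

-- B's loop invariant: the final best is the running minimum over all non-empty prefixes
theorem b_inv : ∀ (t : List Char) (best cur : Int),
    (t.foldl (fun (p : Int × Int) ch =>
        let c : Int := if ch = 'R' then p.2 - 1 else if ch = 'W' then p.2 + 1 else p.2
        (if c < p.1 then c else p.1, c)) (best, cur)).1
      = (List.range t.length).foldl
          (fun m j => min m (cur + (((t.take (j+1)).count 'W' : Int) - ((t.take (j+1)).count 'R' : Int)))) best := by
  intro t
  induction t with
  | nil => intro best cur; simp
  | cons ch t ih =>
    intro best cur
    have hcur : (if ch = 'R' then cur - 1 else if ch = 'W' then cur + 1 else cur)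
        = cur + ((([ch].count 'W' : Int)) - (([ch].count 'R' : Int))) := by
      by_cases h1 : ch = 'R' <;> by_cases h2 : ch = 'W' <;> simp_all <;> omega
    have hmin : ∀ (c : Int), (if c < best then c else best) = min best c := by
      intro c; rcases lt_trichotomy c best with h | h | h <;> simp [min_def] <;> omega
    simp only [List.foldl_cons, hcur, hmin]
    rw [ih]
    rw [show (ch :: t).length = t.length + 1 from rfl, List.range_succ_eq_map,
        List.foldl_cons, List.foldl_map]
    have htake : ∀ (j : Nat), (ch :: t).take (j + 1) = ch :: t.take j := by
      intro j; rfl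
    congr 1
    · funext m j
      congr 1
      simp only [Nat.succ_eq_add_one, htake, List.count_cons, List.count_nil]
      by_cases h1 : ch = 'R' <;> by_cases h2 : ch = 'W' <;> simp [h1, h2] <;> push_cast <;> ring

-- the two ports agree on every string
theorem main_eq (S : String) : solution S = solution_alt S := by
  unfold solution solution_alt
  set L := S.toList with hL
  have htot : ((PySem.Str.count S "R" : Nat) : Int) = (L.count 'R' : Int) := by
    simp [PySem.Str.count_eq, show ("R".toList = ['R']) from rfl, count_one, hL]
  have hlen : PySem.Str.len S + 1 = ((L.length + 1 : Nat) : Int) := by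
    simp [PySem.Str.len_eq, hL]
  rw [hlen, PySem.List.pyRange_one]
  simp only [Int.sub_zero, Int.toNat_natCast, List.foldl_map, Int.zero_add]
  have hstep : (fun (acc : Option Int) (k : Nat) =>
      let red_right : Int := (PySem.Str.count (PySem.Str.slice S (some (k : Int)) none) "R" : Int)
      let white_left : Int := (PySem.Str.count (PySem.Str.slice S none (some (k : Int))) "W" : Int)
      let swaps : Int := red_right + white_left
      some (match acc with
            | none => swaps
            | some m => min m swaps))
      = (fun (acc : Option Int) (k : Nat) =>
        some (match acc with | none => fval L k | some m => min m (fval L k))) := by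
    funext acc k
    simp only [step_val S k, hL]
  rw [hstep]
  rw [List.range_succ_eq_map, List.foldl_cons, List.foldl_map]
  show (match (List.range L.length).foldl
      (fun (acc : Option Int) (k : Nat) =>
        some (match acc with | none => fval L k.succ | some m => min m (fval L k.succ)))
      (some (fval L 0)) with
    | some m => if m ≤ 10 ^ 9 then m else -1
    | none => -1) = _
  rw [foldl_opt_min (fun k => fval L k.succ) (List.range L.length) (fval L 0)]
  rw [htot, b_inv L (L.count 'R' : Int) (L.count 'R' : Int)]
  have h0 : fval L 0 = (L.count 'R' : Int) := by simp [fval]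
  have hfun : (fun (m : Int) (k : Nat) => min m (fval L k.succ))
      = (fun (m : Int) (j : Nat) =>
          min m ((L.count 'R' : Int) + (((L.take (j+1)).count 'W' : Int) - ((L.take (j+1)).count 'R' : Int)))) := by
    funext m j; rw [Nat.succ_eq_add_one, fval_eq L (j + 1)]
  rw [h0, hfun]

-- ===== VERDICT (by name: the statement is the Claim_ definition above) =====
theorem solution_spec : Claim_equal_solution := by
  intro S _
  unfold Spec_solution
  exact main_eq S
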